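-- pv_equiv track=rewrite | github.com/wyjss2015/scir-training-day | 2-python-practice/1-bi-label-to-words/bi-label-to-words.py | bi2words
-- ===== SOURCE A (Python) =====
-- def bi2words(chars):
--     result = []
--     tmp = chars[0][0]
--     i = 1
--     while i < len(chars):
--         char = chars[i]
--         if char[1] == 'B':
--             result.append(tmp)
--             tmp = char[0]
--         else:
--             tmp += char[0]
--         i += 1
--     result.append(tmp)
--     return result
-- ===== SOURCE B (Python) =====
-- def bi2words(chars):
--     # Two staged passes: (1) collect the indices where a new word starts,
--     # (2) join the characters of each slice between consecutive boundaries.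
--     n = len(chars)
--     bounds = [i for i, (_, label) in enumerate(chars) if i == 0 or label == 'B'] + [n]
--     return [''.join(c for c, _ in chars[s:e]) for s, e in zip(bounds, bounds[1:])]
-- ===== Notes on version B (the rewrite author's own statement) =====
-- stated objective: alternative
-- what changed: B replaces A's single accumulator scan by two staged passes: it first collects the boundary indices where words start (index 0 or label 'B'), then builds each word by joining the slice between consecutive boundaries.
import Mathlib
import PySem

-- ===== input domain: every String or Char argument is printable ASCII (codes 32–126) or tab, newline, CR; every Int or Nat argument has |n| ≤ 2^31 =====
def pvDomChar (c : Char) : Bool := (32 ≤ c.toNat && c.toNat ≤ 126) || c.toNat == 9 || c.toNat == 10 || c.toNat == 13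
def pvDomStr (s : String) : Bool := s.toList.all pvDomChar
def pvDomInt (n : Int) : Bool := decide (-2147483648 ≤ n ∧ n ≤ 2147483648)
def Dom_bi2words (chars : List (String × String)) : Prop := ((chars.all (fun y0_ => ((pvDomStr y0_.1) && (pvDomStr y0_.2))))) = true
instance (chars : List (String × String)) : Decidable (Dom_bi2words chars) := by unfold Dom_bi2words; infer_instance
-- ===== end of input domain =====

-- B replaces A's single accumulator scan by two staged passes: collect the word-start
-- indices, then join the characters of each slice between consecutive boundaries
-- (objective: alternative). Pre_ excludes [] where A raises IndexError.

-- ===== PORT A =====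
def bi2wordsLoop (rest : List (String × String)) (result : List String) (tmp : String) : List String :=
  match rest with
  | [] => result ++ [tmp]
  | (c, l) :: rs =>
      if l == "B" then bi2wordsLoop rs (result ++ [tmp]) c
      else bi2wordsLoop rs result (tmp ++ c)

def bi2words (chars : List (String × String)) : List String :=
  match chars with
  | [] => []  -- unreachable: Python raises IndexError here (excluded by Pre_)
  | (c0, _) :: rest => bi2wordsLoop rest [] c0

-- ===== PORT B =====
def bi2words_alt (chars : List (String × String)) : List String :=
  let n : Int := chars.length
  let bounds : List Int :=
    ((PySem.List.enumerate chars).filter (fun p => p.1 == 0 || p.2.2 == "B")).map (fun p => p.1)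
      ++ [n]
  (bounds.zip bounds.tail).map (fun se =>
    PySem.Str.join "" ((PySem.List.slice chars (some se.1) (some se.2)).map Prod.fst))

-- ===== PRECONDITION & SPEC =====
-- Pre_ excludes exactly the empty list, on which A raises IndexError.
def Pre_bi2words (chars : List (String × String)) : Prop := chars ≠ []
instance (chars : List (String × String)) : Decidable (Pre_bi2words chars) := by unfold Pre_bi2words; infer_instance
def pvWitness_bi2words : (List (String × String)) := [("a", "B"), ("b", "I")]


def Spec_bi2words (chars : List (String × String)) (out : List String) : Prop := out = bi2words_alt chars
instance (chars : List (String × String)) (out : List String) : Decidable (Spec_bi2words chars out) := by unfold Spec_bi2words; infer_instance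

-- ===== CLAIM (what is proved, stated in full; the proofs are below) =====
def Claim_equal_bi2words : Prop := ∀ (chars : List (String × String)), Dom_bi2words chars → Pre_bi2words chars → Spec_bi2words chars (bi2words chars)

-- ===== LEMMAS AND PROOFS =====

-- the common specification: the list of words, one accumulator pass (proof artifact)
def pvWords (tmp : String) : List (String × String) → List String
  | [] => [tmp]
  | (c, l) :: rs => if l == "B" then tmp :: pvWords c rs else pvWords (tmp ++ c) rs

theorem pv_loop_eq (rest : List (String × String)) (result : List String) (tmp : String) :
    bi2wordsLoop rest result tmp = result ++ pvWords tmp rest := by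
  induction rest generalizing result tmp with
  | nil => simp [bi2wordsLoop, pvWords]
  | cons p rs ih =>
      obtain ⟨c, l⟩ := p
      by_cases h : l == "B" <;> simp [bi2wordsLoop, pvWords, h, ih]

theorem pv_join_cons (s : String) (ss : List String) :
    PySem.Str.join "" (s :: ss) = s ++ PySem.Str.join "" ss := by
  cases ss with
  | nil =>
      simp [PySem.Str.join, PySem.Chars.join, List.intercalate, String.ofList_toList]
  | cons t ts =>
      simp [PySem.Str.join, PySem.Chars.join_cons_cons, String.ofList_append,
        String.ofList_toList]

theorem pv_join_nil : PySem.Str.join "" ([] : List String) = "" := by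
  simp [PySem.Str.join, PySem.Chars.join_nil]

theorem pvWords_nonB (pre : List (String × String)) (tmp : String) (zs : List (String × String))
    (h : ∀ p ∈ pre, (p.2 == "B") = false) :
    pvWords tmp (pre ++ zs) = pvWords (tmp ++ PySem.Str.join "" (pre.map Prod.fst)) zs := by
  induction pre generalizing tmp with
  | nil => simp [pv_join_nil]
  | cons p ps ih =>
      obtain ⟨c, l⟩ := p
      have hl : (l == "B") = false := h (c, l) (List.mem_cons_self ..)
      simp only [List.cons_append, pvWords, hl, Bool.false_eq_true, if_false]
      rw [ih _ (fun q hq => h q (List.mem_cons_of_mem _ hq)), List.map_cons, pv_join_cons,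
        String.append_assoc]

theorem pv_enum_fst_le {α : Type} (ys : List α) (s : Int) (p : Int × α)
    (hp : p ∈ PySem.List.enumerate ys s) : s ≤ p.1 := by
  induction ys generalizing s with
  | nil => simp [PySem.List.enumerate_nil] at hp
  | cons y ys ih =>
      rw [PySem.List.enumerate_cons] at hp
      rcases List.mem_cons.mp hp with h | h
      · subst h; simp
      · have := ih (s + 1) h; omega

theorem pv_enum_append {α : Type} (xs ys : List α) (s : Int) :
    PySem.List.enumerate (xs ++ ys) s
      = PySem.List.enumerate xs s ++ PySem.List.enumerate ys (s + xs.length) := by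
  induction xs generalizing s with
  | nil => simp [PySem.List.enumerate_nil]
  | cons x xs ih =>
      simp only [List.cons_append, PySem.List.enumerate_cons, ih, List.length_cons]
      have h : s + 1 + (xs.length : Int) = s + ((xs.length + 1 : Nat) : Int) := by omega
      rw [h]

theorem pv_filter_nonB (ys : List (String × String)) (s : Int) (hs : 1 ≤ s)
    (h : ∀ p ∈ ys, (p.2 == "B") = false) :
    (PySem.List.enumerate ys s).filter (fun p => p.1 == 0 || p.2.2 == "B") = [] := by
  induction ys generalizing s with
  | nil => simp [PySem.List.enumerate_nil]
  | cons y ys ih =>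
      have h0 : (s == (0 : Int)) = false := beq_eq_false_iff_ne.mpr (by omega)
      have hl : (y.2 == "B") = false := h y (List.mem_cons_self ..)
      rw [PySem.List.enumerate_cons]
      simp only [List.filter_cons, h0, hl, Bool.or_self]
      rw [if_neg (by simp)]
      exact ih (s + 1) (by omega) (fun q hq => h q (List.mem_cons_of_mem _ hq))

theorem pv_filter_shift (ys : List (String × String)) (k d : Int) (hk : 1 ≤ k) (hd : 0 ≤ d) :
    ((PySem.List.enumerate ys (k + d)).filter (fun p => p.1 == 0 || p.2.2 == "B")).map (fun p => p.1)
      = (((PySem.List.enumerate ys k).filter (fun p => p.1 == 0 || p.2.2 == "B")).map (fun p => p.1)).map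
          (fun a => a + d) := by
  induction ys generalizing k with
  | nil => simp [PySem.List.enumerate_nil]
  | cons y ys ih =>
      have h0 : ((k + d) == (0 : Int)) = false := beq_eq_false_iff_ne.mpr (by omega)
      have h0' : (k == (0 : Int)) = false := beq_eq_false_iff_ne.mpr (by omega)
      rw [PySem.List.enumerate_cons, PySem.List.enumerate_cons]
      have harith : k + d + 1 = (k + 1) + d := by ring
      by_cases hB : (y.2 == "B") = true
      · simp only [List.filter_cons, h0, h0', hB, Bool.false_or, if_true, List.map_cons,
          harith, ih (k + 1) (by omega)]
      · have hB' : (y.2 == "B") = false := by simpa using hB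
        simp only [List.filter_cons, h0, h0', hB', Bool.or_false]
        rw [if_neg (by simp), if_neg (by simp), harith, ih (k + 1) (by omega)]

theorem pv_cp_map (f : Int → Int) (l : List Int) :
    (l.map f).zip (l.map f).tail = (l.zip l.tail).map (fun p => (f p.1, f p.2)) := by
  cases l with
  | nil => simp
  | cons a l =>
      simp only [List.map_cons, List.tail_cons]
      rw [show f a :: l.map f = (a :: l).map f from rfl, List.zip_map]
      exact List.map_congr_left (fun p _ => by cases p; rfl)

theorem pv_slice_shift {α : Type} (front ys : List α) (a b : Int) (ha : 0 ≤ a) (hb : 0 ≤ b) :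
    PySem.List.slice (front ++ ys) (some (a + (front.length : Int))) (some (b + (front.length : Int)))
      = PySem.List.slice ys (some a) (some b) := by
  have h1 : (a + (front.length : Int)).toNat = front.length + a.toNat := by omega
  have h2 : (b + (front.length : Int)).toNat = front.length + b.toNat := by omega
  have h3 : List.drop (front.length + a.toNat) front = ([] : List α) :=
    List.drop_eq_nil_of_le (by omega)
  have h4 : front.length + b.toNat - (front.length + a.toNat) = b.toNat - a.toNat := by omega
  rw [PySem.List.slice_toNat, PySem.List.slice_toNat, h1, h2, List.drop_append, h3, h4,
    Nat.add_sub_cancel_left, List.nil_append]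
  all_goals omega

-- consecutive-pairs unfolding (proof artifact)
theorem pv_cp_cons (a b : Int) (t : List Int) :
    ((a :: b :: t).zip (a :: b :: t).tail) = (a, b) :: ((b :: t).zip (b :: t).tail) := rfl

-- B on a list whose tail carries no 'B' label: one single word
theorem pv_alt_nonB (ys : List (String × String)) (x : String × String)
    (h : ∀ p ∈ ys, (p.2 == "B") = false) :
    bi2words_alt (x :: ys) = pvWords x.1 ys := by
  have hrhs := pvWords_nonB ys x.1 [] h
  rw [List.append_nil] at hrhs
  simp only [pvWords] at hrhs
  rw [hrhs]
  have hslice : PySem.List.slice (x :: ys) (some 0) (some ((x :: ys).length : Int)) = x :: ys := by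
    rw [PySem.List.slice_toNat]
    all_goals try simp
    all_goals omega
  simp only [bi2words_alt, PySem.List.enumerate_cons, List.filter_cons]
  rw [if_pos (by simp), pv_filter_nonB ys (0 + 1) (by omega) h]
  simp only [List.map_cons, List.map_nil, List.nil_append, List.cons_append]
  rw [pv_cp_cons]
  simp only [List.tail_cons, List.zip_nil_right, List.map_cons, List.map_nil]
  rw [hslice, List.map_cons, pv_join_cons]

-- B on x :: pre ++ (c,"B") :: post with a B-free pre: peel off the first word
theorem pv_alt_cons_B (x : String × String) (pre : List (String × String)) (c l : String)
    (post : List (String × String)) (hpreB : ∀ p ∈ pre, (p.2 == "B") = false)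
    (hl : (l == "B") = true) :
    bi2words_alt (x :: (pre ++ (c, l) :: post))
      = (x.1 ++ PySem.Str.join "" (pre.map Prod.fst)) :: bi2words_alt ((c, l) :: post) := by
  have hsufalt : bi2words_alt ((c, l) :: post)
      = ((((0:Int) :: (((PySem.List.enumerate post 1).filter
            (fun p => p.1 == 0 || p.2.2 == "B")).map (fun p => p.1) ++ [(((c, l) :: post).length : Int)])).zip
          (((0:Int) :: (((PySem.List.enumerate post 1).filter
            (fun p => p.1 == 0 || p.2.2 == "B")).map (fun p => p.1) ++ [(((c, l) :: post).length : Int)])).tail)).map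
          (fun se => PySem.Str.join ""
            ((PySem.List.slice ((c, l) :: post) (some se.1) (some se.2)).map Prod.fst))) := by
    simp only [bi2words_alt, PySem.List.enumerate_cons, List.filter_cons, zero_add]
    rw [if_pos (by simp)]
    simp [List.cons_append]
  have hfullenum : ((PySem.List.enumerate ((x :: pre) ++ (c, l) :: post)).filter
        (fun p => p.1 == 0 || p.2.2 == "B")).map (fun p => p.1)
      = 0 :: ((x :: pre).length : Int)
          :: (((PySem.List.enumerate post 1).filter
            (fun p => p.1 == 0 || p.2.2 == "B")).map (fun p => p.1)).map (fun a => a + ((x :: pre).length : Int)) := by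
    rw [pv_enum_append (x :: pre) ((c, l) :: post) 0, List.filter_append, List.map_append,
      PySem.List.enumerate_cons, PySem.List.enumerate_cons]
    simp only [List.filter_cons]
    have harith : (0 : Int) + ((x :: pre).length : Int) + 1 = 1 + ((x :: pre).length : Int) := by
      ring
    rw [if_pos (by simp), if_pos (by simp [hl]), pv_filter_nonB pre (0 + 1) (by omega) hpreB,
      harith]
    simp only [List.map_cons, List.map_nil, List.nil_append, List.cons_append]
    rw [pv_filter_shift post 1 ((x :: pre).length : Int) le_rfl (by positivity)]
    simp [zero_add]
  have hnf : ((((x :: pre) ++ (c, l) :: post).length : Int))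
      = (((c, l) :: post).length : Int) + ((x :: pre).length : Int) := by
    simp only [List.length_append]
    push_cast
    ring
  have hsliceK : PySem.List.slice ((x :: pre) ++ (c, l) :: post) (some 0)
      (some ((x :: pre).length : Int)) = x :: pre := by
    rw [PySem.List.slice_toNat]
    all_goals try simp
    all_goals omega
  have hmem : ∀ a ∈ ((0:Int) :: (((PySem.List.enumerate post 1).filter
            (fun p => p.1 == 0 || p.2.2 == "B")).map (fun p => p.1) ++ [(((c, l) :: post).length : Int)])), 0 ≤ a := by
    intro a ha
    rcases List.mem_cons.mp ha with rfl | ha2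
    · exact le_refl 0
    rcases List.mem_append.mp ha2 with hS | hm
    · obtain ⟨q, hq, rfl⟩ := List.mem_map.mp hS
      have hq1 := (List.mem_filter.mp hq).1
      have := pv_enum_fst_le post 1 q hq1
      omega
    · have : a = (((c, l) :: post).length : Int) := by simpa using hm
      subst this
      positivity
  rw [← List.cons_append, hsufalt]
  simp only [bi2words_alt, hfullenum, hnf]
  have hshape : (0 :: ((x :: pre).length : Int)
          :: (((PySem.List.enumerate post 1).filter
            (fun p => p.1 == 0 || p.2.2 == "B")).map (fun p => p.1)).map (fun a => a + ((x :: pre).length : Int)))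
        ++ [(((c, l) :: post).length : Int) + ((x :: pre).length : Int)]
      = 0 :: (((0:Int) :: (((PySem.List.enumerate post 1).filter
            (fun p => p.1 == 0 || p.2.2 == "B")).map (fun p => p.1) ++ [(((c, l) :: post).length : Int)])).map
          (fun a => a + ((x :: pre).length : Int))) := by
    simp
  have hcons : (((0:Int) :: (((PySem.List.enumerate post 1).filter
            (fun p => p.1 == 0 || p.2.2 == "B")).map (fun p => p.1) ++ [(((c, l) :: post).length : Int)])).map
        (fun a => a + ((x :: pre).length : Int)))
      = ((0:Int) + ((x :: pre).length : Int))
          :: ((((PySem.List.enumerate post 1).filter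
            (fun p => p.1 == 0 || p.2.2 == "B")).map (fun p => p.1) ++ [(((c, l) :: post).length : Int)]).map
              (fun a => a + ((x :: pre).length : Int))) := by
    simp only [List.map_cons]
  rw [hshape, hcons, pv_cp_cons, ← hcons,
    pv_cp_map (fun a => a + ((x :: pre).length : Int))]
  simp only [List.map_cons, List.map_map]
  refine List.cons_eq_cons.mpr ⟨?_, ?_⟩
  · simp only [zero_add]
    rw [hsliceK, List.map_cons, pv_join_cons]
  · refine List.map_congr_left ?_
    intro p hp
    obtain ⟨h1, h2⟩ := List.of_mem_zip hp
    have hp1 := hmem _ h1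
    have hp2 := hmem _ (List.mem_of_mem_tail h2)
    simp only [Function.comp_apply]
    rw [pv_slice_shift (x :: pre) ((c, l) :: post) p.1 p.2 hp1 hp2]

-- B's port equals the one-pass specification pvWords, by induction on the length
theorem pv_alt_eq (N : Nat) : ∀ (ys : List (String × String)) (x : String × String),
    ys.length ≤ N → bi2words_alt (x :: ys) = pvWords x.1 ys := by
  induction N with
  | zero =>
      intro ys x hlen
      have : ys = [] := List.eq_nil_of_length_eq_zero (by omega)
      subst this
      exact pv_alt_nonB [] x (by simp)
  | succ N ih =>
      intro ys x hlen
      by_cases hB : ∀ p ∈ ys, (p.2 == "B") = false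
      · exact pv_alt_nonB ys x hB
      · have hsufne : ys.dropWhile (fun p : String × String => !(p.2 == "B")) ≠ [] := by
          intro hnil
          exact hB (fun p hp => by
            have := List.dropWhile_eq_nil_iff.mp hnil p hp
            simpa using this)
        obtain ⟨⟨c, l⟩, post, hsuf⟩ :
            ∃ c post, ys.dropWhile (fun p : String × String => !(p.2 == "B")) = c :: post := by
          cases hcase : ys.dropWhile (fun p : String × String => !(p.2 == "B")) with
          | nil => exact absurd hcase hsufne
          | cons a b => exact ⟨a, b, rfl⟩
        have hl : (l == "B") = true := by
          have hhead := List.head_dropWhile_not (fun p : String × String => !(p.2 == "B")) hsufne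
          simp only [hsuf, List.head_cons] at hhead
          simpa using hhead
        have hysplit : ys = ys.takeWhile (fun p : String × String => !(p.2 == "B")) ++ (c, l) :: post := by
          rw [← hsuf, List.takeWhile_append_dropWhile]
        have hpreB : ∀ p ∈ ys.takeWhile (fun p : String × String => !(p.2 == "B")), (p.2 == "B") = false := by
          intro p hp
          simpa using List.mem_takeWhile_imp hp
        have hpostlen : post.length ≤ N := by
          have hc := congrArg List.length hysplit
          simp only [List.length_append, List.length_cons] at hc
          omega
        have hIH : bi2words_alt ((c, l) :: post) = pvWords c post := ih post (c, l) hpostlen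
        have hR : pvWords x.1 ys
            = (x.1 ++ PySem.Str.join "" ((ys.takeWhile (fun p : String × String => !(p.2 == "B"))).map Prod.fst))
                :: pvWords c post := by
          conv_lhs => rw [hysplit]
          rw [pvWords_nonB _ x.1 _ hpreB]
          simp [pvWords, hl]
        rw [hR, ← hIH]
        conv_lhs => rw [hysplit]
        exact pv_alt_cons_B x _ c l post hpreB hl

-- ===== VERDICT (by name: the statement is the Claim_ definition above) =====
theorem bi2words_spec : Claim_equal_bi2words := by
  intro chars _ hpre
  unfold Spec_bi2words
  match chars with
  | [] => exact absurd rfl hpre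
  | x :: rest =>
      rw [pv_alt_eq rest.length rest x le_rfl]
      obtain ⟨c0, l0⟩ := x
      simp [bi2words, pv_loop_eq]
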